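-- pv_equiv track=rewrite | github.com/bropenguin847/Python-Learning | exercises/odd_even.py | is_odd
-- ===== SOURCE A (Python) =====
-- def is_odd(number):
--     """
--     Worst is_odd statement ever
--     """
--     incrementor = 1
--     is_incrementor_odd = True
--     while incrementor < number:
--         incrementor += 1
--         if is_incrementor_odd:
--             is_incrementor_odd = False
--         else:
--             is_incrementor_odd = True
--
--     return is_incrementor_odd
-- ===== SOURCE B (Python) =====
-- def is_odd(number):
--     """Constant-time parity test."""
--     return number % 2 == 1
-- ===== Notes on version B (the rewrite author's own statement) =====
-- stated objective: faster
-- what changed: replaces the O(number) flip-a-flag counting loop with a single constant-time modulo test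
-- intended difference: On even numbers <= 0 A's loop never runs and it returns its initial True, calling 0 and every negative even number odd; B returns False there, the intended parity answer. — e.g. on is_odd(0): A returns true, B returns false
import Mathlib
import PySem

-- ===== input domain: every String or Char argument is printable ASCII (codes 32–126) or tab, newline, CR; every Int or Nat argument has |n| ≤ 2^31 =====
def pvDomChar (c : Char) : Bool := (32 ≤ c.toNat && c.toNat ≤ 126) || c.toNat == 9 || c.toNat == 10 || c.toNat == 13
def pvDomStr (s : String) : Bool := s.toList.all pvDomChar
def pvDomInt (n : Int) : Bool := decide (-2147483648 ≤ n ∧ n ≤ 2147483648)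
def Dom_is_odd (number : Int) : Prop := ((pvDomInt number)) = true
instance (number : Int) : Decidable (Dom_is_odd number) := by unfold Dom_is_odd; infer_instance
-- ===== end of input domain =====

-- B replaces A's O(number) flag-flipping loop with a constant-time modulo test;
-- on even numbers <= 0 A wrongly returns True, B returns the intended False (see D_).


-- ===== PORT A =====
-- the while loop: flips the flag once per increment until incrementor reaches number
def isOddLoop (number incrementor : Int) (isIncOdd : Bool) : Bool :=
  if incrementor < number then
    isOddLoop number (incrementor + 1) (if isIncOdd then false else true)
  else
    isIncOdd
termination_by (number - incrementor).toNat
decreasing_by omega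

def is_odd (number : Int) : Bool := isOddLoop number 1 true

-- ===== PORT B =====
def is_odd_alt (number : Int) : Bool := PySem.Int.mod number 2 == 1

-- ===== PRECONDITION & SPEC =====
-- On even numbers <= 0 A's loop never runs and A returns its initial True,
-- calling 0 and negative even numbers odd; B returns False, the intended parity.
def D_is_odd (number : Int) : Prop := number ≤ 0 ∧ number % 2 = 0
instance (number : Int) : Decidable (D_is_odd number) := by unfold D_is_odd; infer_instance
def Spec_is_odd (number : Int) (out : Bool) : Prop := ¬ D_is_odd number → out = is_odd_alt number
instance (number : Int) (out : Bool) : Decidable (Spec_is_odd number out) := by unfold Spec_is_odd; infer_instance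
def pvDiffWitness_is_odd : Int := 0
def pvDiffWitnessOut_is_odd : Bool × Bool := (true, false)

-- ===== CLAIM (what is proved, stated in full; the proofs are below) =====
def Claim_unchanged_is_odd : Prop := ∀ (number : Int), Dom_is_odd number → Spec_is_odd number (is_odd number)
def Claim_changed_is_odd : Prop := Dom_is_odd (pvDiffWitness_is_odd) ∧ D_is_odd (pvDiffWitness_is_odd) ∧ is_odd (pvDiffWitness_is_odd) = pvDiffWitnessOut_is_odd.1 ∧ is_odd_alt (pvDiffWitness_is_odd) = pvDiffWitnessOut_is_odd.2 ∧ pvDiffWitnessOut_is_odd.1 ≠ pvDiffWitnessOut_is_odd.2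
def Claim_exact_is_odd : Prop := ∀ (number : Int), Dom_is_odd number → D_is_odd number → is_odd number ≠ is_odd_alt number

-- ===== LEMMAS AND PROOFS =====
-- the loop flips the flag exactly (number - incrementor) times (when incrementor ≤ number)
theorem isOddLoop_eq (number : Int) : ∀ (inc : Int) (b : Bool), inc ≤ number →
    isOddLoop number inc b = (if (number - inc) % 2 = 0 then b else !b) := by
  intro inc b hle
  by_cases h : inc < number
  · rw [isOddLoop]
    simp only [h, if_pos]
    rw [isOddLoop_eq number (inc + 1) (if b then false else true) (by omega)]
    have : (number - inc) % 2 = 0 ↔ ¬ ((number - (inc + 1)) % 2 = 0) := by omega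
    cases b <;> split_ifs <;> simp_all
  · rw [isOddLoop]
    have h0 : number - inc = 0 := by omega
    simp [h, h0]
termination_by inc => (number - inc).toNat

theorem is_odd_eq (number : Int) (h : 1 ≤ number) :
    is_odd number = decide (number % 2 = 1) := by
  rw [is_odd, isOddLoop_eq number 1 true h]
  have : (number - 1) % 2 = 0 ↔ number % 2 = 1 := by omega
  split_ifs <;> simp_all

theorem is_odd_le_one (number : Int) (h : number ≤ 1) : is_odd number = true := by
  rw [is_odd, isOddLoop]
  simp [show ¬ (1 < number) by omega]

theorem alt_eq (number : Int) : is_odd_alt number = decide (number % 2 = 1) := by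
  have h : Int.fmod number 2 = number % 2 := by
    rw [Int.fmod_eq_emod_of_nonneg _ (by norm_num)]
  by_cases hm : number % 2 = 1 <;> simp [is_odd_alt, PySem.Int.mod, h, hm]

-- ===== VERDICT (by name: the statement is the Claim_ definition above) =====
theorem is_odd_spec : Claim_unchanged_is_odd := by
  intro n _ hD
  rw [alt_eq]
  rcases lt_or_ge n 1 with h | h
  · rw [is_odd_le_one n (by omega)]
    simp only [D_is_odd, not_and] at hD
    have : n % 2 = 1 := by omega
    simp [this]
  · exact is_odd_eq n h

theorem is_odd_changed : Claim_changed_is_odd := by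
  unfold Claim_changed_is_odd
  refine ⟨by decide, by decide, ?_, by decide, by decide⟩
  exact is_odd_le_one 0 (by norm_num)

theorem is_odd_tight : Claim_exact_is_odd := by
  intro n _ hD
  rcases hD with ⟨h1, h2⟩
  rw [is_odd_le_one n (by omega), alt_eq]
  simp [h2]
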